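-- pv_equiv track=rewrite | github.com/gavinabernethy/arteeri | data_manager_functions.py | format_dictionary_to_JSON_string
-- ===== SOURCE A (Python) =====
-- def format_dictionary_to_JSON_string(input_string, is_final_item, is_indenting):
--     # This takes a string obtained from passing a nested dictionary to json.dumps and recreates the indented structure
--     # of the original dictionary in the string, suitable for printing to screen or file as a human-readable JSON that
--     # can also then be read back from the file by passing the raw text to json.loads() to convert to a dictionary.
--     #
--     # The purpose of this is to:
--     # i) print highly-nested dictionary structures better than permitted by pprint()
--     # ii) allow writing and reading of dictionaries as JSON data WITHOUT EVER PRINTING TO AN ACTUAL .JSON FILE, which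
--     #       makes it easier to include in the single STOUT > .txt printing in Condor.
--     #
--     modified_string = input_string.replace('},', '}')
--     modified_string = modified_string.replace('} ', '}')
--     open_list = modified_string.split('{')
--     indent_count = 0
--     output_string = ''
--     if is_indenting:
--         indent_str = '    '
--     else:
--         indent_str = ''
--
--     # first split and iterate by { which increases the nesting
--     for element_index, element in enumerate(open_list):
--         base_string = ''
--         indent_count += 1
--         if '}' in element:
--             closed_sublist = element.split('}')
--
--             # within them, split and iterate by } which decreases nesting
--             for sub_index, sub_element in enumerate(closed_sublist[0:len(closed_sublist) - 1]):
--                 indent_count -= 1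
--
--                 if len(closed_sublist[sub_index]) > 0 and len(closed_sublist[sub_index + 1]) > 0:
--                     base_string += sub_element + '\n' + indent_str * indent_count + '},\n' \
--                                    + indent_str * (indent_count - 1)
--                 elif len(closed_sublist[sub_index]) > 0 and len(closed_sublist[sub_index + 1]) == 0:
--                     base_string += sub_element + '\n' + indent_str * indent_count + '}\n' \
--                                    + indent_str * (indent_count - 1)
--                 elif len(closed_sublist[sub_index]) == 0 and len(closed_sublist[sub_index + 1]) > 0:
--                     base_string += sub_element + '},\n' + indent_str * (indent_count - 1)
--                 elif len(closed_sublist[sub_index]) == 0 and len(closed_sublist[sub_index + 1]) == 0: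
--                     if element_index == len(open_list) - 1 and sub_index == len(closed_sublist) - 2:
--                         # no new-line at the very end of the dictionary
--                         if is_final_item:
--                             # only add a final comma if required
--                             base_string += sub_element + '}'
--                         else:
--                             base_string += sub_element + '},'
--                     else:
--                         base_string += sub_element + '}\n' + indent_str * (indent_count - 1)
--
--             if element_index == len(open_list) - 1:
--                 # for the final element of the whole, do not add an additional { after the final sub-element
--                 base_string += closed_sublist[-1]
--             else:
--                 base_string += closed_sublist[-1] + '{\n' + indent_str * indent_count
--         else:
--             # only one "sub-element" i.e. { ... { with no } in between
--             if element_index == len(open_list) - 1: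
--                 # for the final element, do not add an additional {
--                 base_string = element
--             else:
--                 base_string = element + '{\n' + indent_str * indent_count
--         output_string += base_string
--     return output_string
-- ===== SOURCE B (Python) =====
-- def format_dictionary_to_JSON_string(input_string, is_final_item, is_indenting):
--     # Single left-to-right character scan instead of nested split/enumerate passes.
--     s = input_string.replace('},', '}').replace('} ', '}')
--     ind = '    ' if is_indenting else ''
--     out = []
--     depth = 1
--     seg = 0  # number of ordinary characters since the last brace
--     n = len(s)
--     for i, ch in enumerate(s):
--         if ch == '{':
--             out.append('{\n' + ind * depth)
--             depth += 1
--             seg = 0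
--         elif ch == '}':
--             depth -= 1
--             nxt = i + 1 < n and s[i + 1] != '{' and s[i + 1] != '}'
--             if seg > 0:
--                 out.append('\n' + ind * depth + ('},\n' if nxt else '}\n') + ind * (depth - 1))
--             elif nxt:
--                 out.append('},\n' + ind * (depth - 1))
--             elif i == n - 1:
--                 out.append('}' if is_final_item else '},')
--             else:
--                 out.append('}\n' + ind * (depth - 1))
--             seg = 0
--         else:
--             out.append(ch)
--             seg += 1
--     return ''.join(out)
-- ===== Notes on version B (the rewrite author's own statement) =====
-- stated objective: simpler
-- what changed: A's nested split('{')/split('}')/enumerate passes with index-based neighbour lookups are replaced by a single left-to-right character scan that keeps a depth counter and the length of the segment since the last brace, with one-character lookahead for the comma decision.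
import Mathlib
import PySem

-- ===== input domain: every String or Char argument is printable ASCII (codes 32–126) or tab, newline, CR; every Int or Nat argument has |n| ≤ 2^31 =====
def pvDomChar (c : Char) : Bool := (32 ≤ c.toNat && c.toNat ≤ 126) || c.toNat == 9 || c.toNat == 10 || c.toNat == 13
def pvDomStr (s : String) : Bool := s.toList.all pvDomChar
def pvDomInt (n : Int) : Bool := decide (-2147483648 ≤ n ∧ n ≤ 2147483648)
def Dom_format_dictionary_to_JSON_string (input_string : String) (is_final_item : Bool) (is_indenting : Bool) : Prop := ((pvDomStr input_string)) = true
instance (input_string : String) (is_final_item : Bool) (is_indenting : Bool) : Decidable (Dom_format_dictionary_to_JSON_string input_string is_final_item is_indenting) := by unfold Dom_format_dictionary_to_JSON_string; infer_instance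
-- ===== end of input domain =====

-- B replaces A's nested split('{')/split('}')/enumerate passes by one left-to-right character
-- scan of the normalised string (objective: simpler, single pass); return values are identical.

-- ===== PORT A =====
-- A transliterated on List Char with PySem.Chars primitives. Python's inner loop
-- `for sub_index, sub_element in enumerate(closed_sublist[0:len-1])`, whose body reads
-- closed_sublist[sub_index] (= sub_element itself) and closed_sublist[sub_index + 1], is rendered
-- as the obvious structural recursion over the same list carrying the current and the next
-- segment; `sub_index == len(closed_sublist) - 2` / `element_index == len(open_list) - 1` are the
-- "rest is empty" tests of that recursion, closed_sublist[-1] is its one-segment base case; the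
-- state (indent_count, accumulated string) is the same.  indent_str * k is PySem.List.pyRepeat.
def fdjInnerA (ind : List Char) (isFinal elemLast : Bool) : List (List Char) → Int → List Char × Int
  | [], d => ([], d)                -- unreachable: split() never returns an empty list
  | [lastSeg], d => (lastSeg, d)    -- base_string += closed_sublist[-1]
  | cur :: next :: rest, d =>
      let d' := d - 1
      let piece : List Char :=
        if cur.length > 0 ∧ next.length > 0 then
          cur ++ '\n' :: (PySem.List.pyRepeat ind d' ++ '}' :: ',' :: '\n' :: PySem.List.pyRepeat ind (d' - 1))
        else if cur.length > 0 ∧ next.length = 0 then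
          cur ++ '\n' :: (PySem.List.pyRepeat ind d' ++ '}' :: '\n' :: PySem.List.pyRepeat ind (d' - 1))
        else if cur.length = 0 ∧ next.length > 0 then
          cur ++ '}' :: ',' :: '\n' :: PySem.List.pyRepeat ind (d' - 1)
        else
          if elemLast && rest.isEmpty then
            if isFinal then cur ++ ['}'] else cur ++ ['}', ',']
          else
            cur ++ '}' :: '\n' :: PySem.List.pyRepeat ind (d' - 1)
      let r := fdjInnerA ind isFinal elemLast (next :: rest) d'
      (piece ++ r.1, r.2)

def fdjOuterA (ind : List Char) (isFinal : Bool) : List (List Char) → Int → List Char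
  | [], _ => []
  | elem :: rest, d =>
      let elemLast := rest.isEmpty
      let d1 := d + 1
      let br :=
        if PySem.Chars.isIn ['}'] elem then
          let closed := PySem.Chars.splitOn elem ['}']
          let r := fdjInnerA ind isFinal elemLast closed d1
          if elemLast then (r.1, r.2)
          else (r.1 ++ '{' :: '\n' :: PySem.List.pyRepeat ind r.2, r.2)
        else
          if elemLast then (elem, d1)
          else (elem ++ '{' :: '\n' :: PySem.List.pyRepeat ind d1, d1)
      br.1 ++ fdjOuterA ind isFinal rest br.2

def format_dictionary_to_JSON_string (input_string : String) (is_final_item : Bool) (is_indenting : Bool) : String :=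
  let m := PySem.Chars.replace (PySem.Chars.replace input_string.toList ['}', ','] ['}']) ['}', ' '] ['}']
  let ind : List Char := if is_indenting then [' ', ' ', ' ', ' '] else []
  String.mk (fdjOuterA ind is_final_item (PySem.Chars.splitOn m ['{']) 0)

-- ===== PORT B =====
-- one character scan; state: current depth and the number of ordinary chars since the last brace
def fdjScanB (ind : List Char) (isFinal : Bool) : List Char → Int → Nat → List Char
  | [], _, _ => []
  | c :: rest, d, seg =>
      if c = '{' then
        '{' :: '\n' :: (PySem.List.pyRepeat ind d ++ fdjScanB ind isFinal rest (d + 1) 0)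
      else if c = '}' then
        let d' := d - 1
        let nxt : Bool :=
          match rest with
          | c' :: _ => decide (c' ≠ '{' ∧ c' ≠ '}')
          | [] => false
        let piece : List Char :=
          if seg > 0 then
            '\n' :: (PySem.List.pyRepeat ind d' ++
              (if nxt then '}' :: ',' :: '\n' :: PySem.List.pyRepeat ind (d' - 1)
               else '}' :: '\n' :: PySem.List.pyRepeat ind (d' - 1)))
          else if nxt then '}' :: ',' :: '\n' :: PySem.List.pyRepeat ind (d' - 1)
          else if rest.isEmpty then (if isFinal then ['}'] else ['}', ','])
          else '}' :: '\n' :: PySem.List.pyRepeat ind (d' - 1)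
        piece ++ fdjScanB ind isFinal rest d' 0
      else c :: fdjScanB ind isFinal rest d (seg + 1)

def format_dictionary_to_JSON_string_alt (input_string : String) (is_final_item : Bool) (is_indenting : Bool) : String :=
  let m := PySem.Chars.replace (PySem.Chars.replace input_string.toList ['}', ','] ['}']) ['}', ' '] ['}']
  let ind : List Char := if is_indenting then [' ', ' ', ' ', ' '] else []
  String.mk (fdjScanB ind is_final_item m 1 0)

-- ===== PRECONDITION & SPEC =====
def Spec_format_dictionary_to_JSON_string (input_string : String) (is_final_item : Bool) (is_indenting : Bool) (out : String) : Prop := out = format_dictionary_to_JSON_string_alt input_string is_final_item is_indenting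
instance (input_string : String) (is_final_item : Bool) (is_indenting : Bool) (out : String) : Decidable (Spec_format_dictionary_to_JSON_string input_string is_final_item is_indenting out) := by unfold Spec_format_dictionary_to_JSON_string; infer_instance

-- ===== CLAIM (what is proved, stated in full; the proofs are below) =====
def Claim_equal_format_dictionary_to_JSON_string : Prop := ∀ (input_string : String) (is_final_item : Bool) (is_indenting : Bool), Dom_format_dictionary_to_JSON_string input_string is_final_item is_indenting → Spec_format_dictionary_to_JSON_string input_string is_final_item is_indenting (format_dictionary_to_JSON_string input_string is_final_item is_indenting)

-- ===== LEMMAS AND PROOFS =====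

lemma fdj_splitOn_go_eq (c : Char) : ∀ (fuel : Nat) (l cur : List Char) (acc : List (List Char)), l.length < fuel →
    PySem.Chars.splitOn.go [c] fuel l cur acc
      = acc.reverse ++ List.modifyHead (fun p => cur.reverse ++ p) (List.splitOn c l) := by
  intro fuel
  induction fuel with
  | zero => intro l cur acc h; omega
  | succ n ih =>
    intro l cur acc h
    cases l with
    | nil =>
      simp [PySem.Chars.splitOn.go, List.splitOn, List.splitOnP, List.splitOnP.go]
    | cons a rest =>
      by_cases hac : a = c
      · subst hac
        have hpre : [a].isPrefixOf (a :: rest) = true := by simp [List.isPrefixOf]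
        rw [PySem.Chars.splitOn.go]
        simp only [hpre, if_pos]
        rw [ih _ _ _ (by simpa using Nat.lt_of_succ_lt_succ h)]
        have : List.splitOn a (a :: rest) = [] :: List.splitOn a rest := by
          simp [List.splitOn, List.splitOnP_cons]
        rw [this]
        obtain ⟨h0, tl, htl⟩ : ∃ h0 tl, List.splitOn a rest = h0 :: tl := by
          rcases e : List.splitOn a rest with _ | ⟨h0, tl⟩
          · exact absurd e (List.splitOnP_ne_nil _ _)
          · exact ⟨h0, tl, rfl⟩
        simp [htl]
      · have hpre : [c].isPrefixOf (a :: rest) = false := by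
          simp [List.isPrefixOf]; intro h'; exact absurd h'.symm hac
        rw [PySem.Chars.splitOn.go]
        simp only [hpre, Bool.false_eq_true, if_neg, not_false_iff]
        rw [ih _ _ _ (by simpa using Nat.lt_of_succ_lt_succ h)]
        have : List.splitOn c (a :: rest) = List.modifyHead (List.cons a) (List.splitOn c rest) := by
          simp only [List.splitOn, List.splitOnP_cons, beq_iff_eq]
          rw [if_neg hac]
        rw [this]
        obtain ⟨h0, tl, htl⟩ : ∃ h0 tl, List.splitOn c rest = h0 :: tl := by
          rcases e : List.splitOn c rest with _ | ⟨h0, tl⟩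
          · exact absurd e (List.splitOnP_ne_nil _ _)
          · exact ⟨h0, tl, rfl⟩
        simp [htl]

lemma fdj_splitOn_eq (s : List Char) (c : Char) : PySem.Chars.splitOn s [c] = List.splitOn c s := by
  unfold PySem.Chars.splitOn
  rw [fdj_splitOn_go_eq c (s.length + 1) s [] [] (by omega)]
  obtain ⟨h0, tl, htl⟩ : ∃ h0 tl, List.splitOn c s = h0 :: tl := by
    rcases e : List.splitOn c s with _ | ⟨h0, tl⟩
    · exact absurd e (List.splitOnP_ne_nil _ _)
    · exact ⟨h0, tl, rfl⟩
  simp [htl]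

lemma fdj_mem_intercalate (sep : List Char) :
    ∀ (parts : List (List Char)) (p : List Char), p ∈ parts → ∀ a ∈ p, a ∈ List.intercalate sep parts := by
  intro parts
  induction parts with
  | nil => intro p hp; simp at hp
  | cons x xs ih =>
    intro p hp a ha
    cases xs with
    | nil => simp at hp; subst hp; simpa [List.intercalate] using ha
    | cons y zs =>
      have hcc : List.intercalate sep (x :: y :: zs) = x ++ sep ++ List.intercalate sep (y :: zs) := by
        simp [List.intercalate]
      rw [hcc]
      rcases List.mem_cons.mp hp with rfl | hp'
      · simp [ha]
      · simp [ih p hp' a ha]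

lemma fdj_not_mem_splitOn (c : Char) :
    ∀ (s : List Char), ∀ p ∈ List.splitOn c s, c ∉ p := by
  intro s
  induction s with
  | nil => intro p hp; simp [List.splitOn, List.splitOnP, List.splitOnP.go] at hp; simp [hp]
  | cons a rest ih =>
    intro p hp
    by_cases hac : a = c
    · subst hac
      have : List.splitOn a (a :: rest) = [] :: List.splitOn a rest := by
        simp [List.splitOn, List.splitOnP_cons]
      rw [this] at hp
      rcases List.mem_cons.mp hp with rfl | hp'
      · simp
      · exact ih p hp'
    · have : List.splitOn c (a :: rest) = List.modifyHead (List.cons a) (List.splitOn c rest) := by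
        simp only [List.splitOn, List.splitOnP_cons, beq_iff_eq]
        rw [if_neg hac]
      rw [this] at hp
      obtain ⟨h0, tl, htl⟩ : ∃ h0 tl, List.splitOn c rest = h0 :: tl := by
        rcases e : List.splitOn c rest with _ | ⟨h0, tl⟩
        · exact absurd e (List.splitOnP_ne_nil _ _)
        · exact ⟨h0, tl, rfl⟩
      rw [htl] at hp
      rcases List.mem_cons.mp hp with rfl | hp'
      · intro hmem
        rcases List.mem_cons.mp hmem with h' | h'
        · exact hac h'.symm
        · exact ih h0 (by simp [htl]) h'
      · exact ih p (by simp [htl, hp'])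

lemma fdj_isIn_singleton (c : Char) (l : List Char) : PySem.Chars.isIn [c] l = true ↔ c ∈ l := by
  rw [PySem.Chars.isIn_iff_infix]; exact List.singleton_infix_iff c l

lemma fdj_scan_copy (ind : List Char) (F : Bool) :
    ∀ (cs : List Char), (∀ a ∈ cs, a ≠ '{' ∧ a ≠ '}') → ∀ t d seg,
      fdjScanB ind F (cs ++ t) d seg = cs ++ fdjScanB ind F t d (seg + cs.length) := by
  intro cs
  induction cs with
  | nil => intro h t d seg; simp
  | cons a cs ih =>
    intro h t d seg
    have ha := h a (by simp)
    rw [List.cons_append]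
    simp only [fdjScanB]
    rw [if_neg ha.1, if_neg ha.2]
    rw [ih (fun x hx => h x (by simp [hx])) t d (seg + 1)]
    have hlen : seg + 1 + cs.length = seg + (a :: cs).length := by simp; omega
    rw [hlen]; simp

lemma fdj_scan_brace (ind : List Char) (F : Bool) (t : List Char) (d : Int) (seg : Nat) :
    fdjScanB ind F ('{' :: t) d seg = fdjScanB ind F ('{' :: t) d 0 := by
  simp [fdjScanB]

lemma fdj_scan_close (ind : List Char) (F : Bool) (rest : List Char) (d : Int) (seg : Nat) :
    fdjScanB ind F ('}' :: rest) d seg =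
      (if seg > 0 then
        '\n' :: (PySem.List.pyRepeat ind (d - 1) ++
          (if (match rest with | c' :: _ => decide (c' ≠ '{' ∧ c' ≠ '}') | [] => false) then
            '}' :: ',' :: '\n' :: PySem.List.pyRepeat ind (d - 1 - 1)
           else '}' :: '\n' :: PySem.List.pyRepeat ind (d - 1 - 1)))
      else if (match rest with | c' :: _ => decide (c' ≠ '{' ∧ c' ≠ '}') | [] => false) then
        '}' :: ',' :: '\n' :: PySem.List.pyRepeat ind (d - 1 - 1)
      else if rest.isEmpty then (if F then ['}'] else ['}', ','])
      else '}' :: '\n' :: PySem.List.pyRepeat ind (d - 1 - 1)) ++ fdjScanB ind F rest (d - 1) 0 := by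
  simp only [fdjScanB]
  rfl

lemma fdj_inner_eq (ind : List Char) (F : Bool) :
    ∀ (closed : List (List Char)) (tail : List Char) (d : Int),
      closed ≠ [] →
      (∀ p ∈ closed, ∀ a ∈ p, a ≠ '{' ∧ a ≠ '}') →
      (tail = [] ∨ ∃ t, tail = '{' :: t) →
      fdjScanB ind F (List.intercalate ['}'] closed ++ tail) d 0 =
        (fdjInnerA ind F tail.isEmpty closed d).1 ++
          fdjScanB ind F tail (fdjInnerA ind F tail.isEmpty closed d).2 0 := by
  intro closed
  induction closed with
  | nil => intro tail d hne; exact absurd rfl hne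
  | cons x xs ih =>
    intro tail d hne hparts htail
    cases xs with
    | nil =>
      have hx := hparts x (by simp)
      rw [show List.intercalate ['}'] [x] = x from by simp [List.intercalate]]
      rw [fdj_scan_copy ind F x hx tail d 0]
      rcases htail with rfl | ⟨t, rfl⟩
      · simp [fdjInnerA, fdjScanB]
      · rw [fdj_scan_brace]
        simp [fdjInnerA]
    | cons y zs =>
      have hx := hparts x (by simp)
      have hy := hparts y (by simp)
      have hcc : List.intercalate ['}'] (x :: y :: zs) = x ++ '}' :: List.intercalate ['}'] (y :: zs) := by
        simp [List.intercalate]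
      rw [hcc]
      simp only [List.append_assoc, List.cons_append]
      rw [fdj_scan_copy ind F x hx _ d 0, fdj_scan_close]
      rw [ih tail (d - 1) (by simp) (fun p hp => hparts p (by simp [hp])) htail]
      -- abbreviations
      set I' := List.intercalate ['}'] (y :: zs) with hI'
      set r := fdjInnerA ind F tail.isEmpty (y :: zs) (d - 1) with hr
      -- compute the head facts
      have hnxt : (match I' ++ tail with | c' :: _ => decide (c' ≠ '{' ∧ c' ≠ '}') | [] => false) = !y.isEmpty := by
        cases y with
        | nil =>
          cases zs with
          | nil =>
            rcases htail with rfl | ⟨t, rfl⟩ <;> simp [hI', List.intercalate]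
          | cons z zs' => simp [hI', List.intercalate]
        | cons c0 ys =>
          have hc0 := hy c0 (by simp)
          cases zs with
          | nil => simp [hI', List.intercalate, hc0.1, hc0.2]
          | cons z zs' => simp [hI', List.intercalate, hc0.1, hc0.2]
      have hempty : (I' ++ tail).isEmpty = (y.isEmpty && zs.isEmpty && tail.isEmpty) := by
        cases y with
        | nil =>
          cases zs with
          | nil => simp [hI', List.intercalate]
          | cons z zs' => simp [hI', List.intercalate]
        | cons c0 ys =>
          cases zs with
          | nil => simp [hI', List.intercalate]
          | cons z zs' => simp [hI', List.intercalate]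
      rw [hnxt, hempty]
      -- unfold A's inner step
      simp only [fdjInnerA]
      -- now a piece-by-piece case analysis
      cases x with
      | nil =>
        cases y with
        | nil => simp [List.append_assoc, Bool.and_comm, ← hr]
        | cons b y' => simp [List.append_assoc, ← hr]
      | cons a x' =>
        cases y with
        | nil => simp [List.append_assoc, ← hr]
        | cons b y' => simp [List.append_assoc, ← hr]

lemma fdj_parts_free (e : List Char) (he : '{' ∉ e) :
    ∀ p ∈ List.splitOn '}' e, ∀ a ∈ p, a ≠ '{' ∧ a ≠ '}' := by
  intro p hp a ha
  refine ⟨fun h => ?_, fun h => ?_⟩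
  · refine he ?_
    have := fdj_mem_intercalate ['}'] (List.splitOn '}' e) p hp a ha
    rw [List.intercalate_splitOn] at this
    exact h ▸ this
  · exact fdj_not_mem_splitOn '}' e p hp (h ▸ ha)

lemma fdj_splitOn_ne_nil' (c : Char) (s : List Char) : List.splitOn c s ≠ [] :=
  List.splitOnP_ne_nil _ s

lemma fdj_main_eq (ind : List Char) (F : Bool) :
    ∀ (n : Nat) (s : List Char), s.length ≤ n → ∀ d : Int,
      fdjOuterA ind F (List.splitOn '{' s) d = fdjScanB ind F s (d + 1) 0 := by
  intro n
  induction n with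
  | zero =>
    intro s hs d
    have : s = [] := List.eq_nil_of_length_eq_zero (by omega)
    subst this
    rw [show List.splitOn '{' ([] : List Char) = [[]] from by
      simp [List.splitOn, List.splitOnP, List.splitOnP.go]]
    simp only [fdjOuterA]
    rw [if_neg (by simp [fdj_isIn_singleton])]
    simp [fdjScanB]
  | succ n ih =>
    intro s hs d
    by_cases hbr : '{' ∈ s
    · obtain ⟨e, t, rfl, he⟩ := List.eq_append_cons_of_mem hbr
      have hsplit : List.splitOn '{' (e ++ '{' :: t) = e :: List.splitOn '{' t := by
        have h1 : ∀ x ∈ e, ¬ ((x == '{') = true) := fun x hx h => he ((beq_iff_eq.mp h) ▸ hx)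
        simpa [List.splitOn] using List.splitOnP_first (· == '{') e h1 '{' (by simp) t
      rw [hsplit]
      -- A side: one outer step
      simp only [fdjOuterA]
      have hrest : (List.splitOn '{' t).isEmpty = false := by
        rcases e' : List.splitOn '{' t with _ | _
        · exact absurd e' (fdj_splitOn_ne_nil' _ _)
        · simp
      rw [hrest]
      simp only [Bool.false_eq_true, if_false]
      have hlen : t.length ≤ n := by simp at hs; omega
      by_cases hcl : '}' ∈ e
      · rw [if_pos (by simpa [fdj_isIn_singleton] using hcl)]
        rw [fdj_splitOn_eq]
        -- B side via inner_eq with tail = '{' :: t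
        have hdecomp : e ++ '{' :: t = List.intercalate ['}'] (List.splitOn '}' e) ++ ('{' :: t) := by
          rw [List.intercalate_splitOn]
        rw [hdecomp]
        rw [fdj_inner_eq ind F (List.splitOn '}' e) ('{' :: t) (d + 1)
          (fdj_splitOn_ne_nil' _ _) (fdj_parts_free e he) (Or.inr ⟨t, rfl⟩)]
        simp only [List.isEmpty_cons]
        set r := fdjInnerA ind F false (List.splitOn '}' e) (d + 1) with hr
        -- unfold scan at the '{'
        have : fdjScanB ind F ('{' :: t) r.2 0 =
            '{' :: '\n' :: (PySem.List.pyRepeat ind r.2 ++ fdjScanB ind F t (r.2 + 1) 0) := by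
          simp [fdjScanB]
        rw [this, ih t hlen r.2]
        simp [List.append_assoc]
      · rw [if_neg (by simpa [fdj_isIn_singleton] using hcl)]
        have hfree : ∀ a ∈ e, a ≠ '{' ∧ a ≠ '}' := by
          intro a ha
          exact ⟨fun h => he (h ▸ ha), fun h => hcl (h ▸ ha)⟩
        rw [show e ++ '{' :: t = e ++ ('{' :: t) from rfl]
        rw [fdj_scan_copy ind F e hfree ('{' :: t) (d + 1) 0]
        have : fdjScanB ind F ('{' :: t) (d + 1) (0 + e.length) =
            '{' :: '\n' :: (PySem.List.pyRepeat ind (d + 1) ++ fdjScanB ind F t (d + 1 + 1) 0) := by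
          simp [fdjScanB]
        rw [this, ih t hlen (d + 1)]
        simp [List.append_assoc]
    · have hsingle : List.splitOn '{' s = [s] := by
        have h1 : ∀ x ∈ s, ¬ ((x == '{') = true) := fun x hx h => hbr ((beq_iff_eq.mp h) ▸ hx)
        simpa [List.splitOn] using List.splitOnP_eq_single (· == '{') s h1
      rw [hsingle]
      simp only [fdjOuterA]
      by_cases hcl : '}' ∈ s
      · rw [if_pos (by simpa [fdj_isIn_singleton] using hcl)]
        rw [fdj_splitOn_eq]
        have hdecomp : s = List.intercalate ['}'] (List.splitOn '}' s) ++ ([] : List Char) := by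
          rw [List.intercalate_splitOn]; simp
        conv_rhs => rw [hdecomp]
        rw [fdj_inner_eq ind F (List.splitOn '}' s) [] (d + 1)
          (fdj_splitOn_ne_nil' _ _) (fdj_parts_free s hbr) (Or.inl rfl)]
        simp [fdjScanB]
      · rw [if_neg (by simpa [fdj_isIn_singleton] using hcl)]
        have hfree : ∀ a ∈ s, a ≠ '{' ∧ a ≠ '}' := by
          intro a ha
          exact ⟨fun h => hbr (h ▸ ha), fun h => hcl (h ▸ ha)⟩
        have := fdj_scan_copy ind F s hfree [] (d + 1) 0
        simp at this
        rw [this]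
        simp [fdjScanB]

-- the two entry points agree at the list level
lemma fdj_entry (m ind : List Char) (F : Bool) :
    String.mk (fdjOuterA ind F (PySem.Chars.splitOn m ['{']) 0) = String.mk (fdjScanB ind F m 1 0) := by
  rw [fdj_splitOn_eq]
  exact congrArg String.mk (by simpa using fdj_main_eq ind F m.length m le_rfl 0)

-- ===== VERDICT (by name: the statement is the Claim_ definition above) =====
theorem format_dictionary_to_JSON_string_spec : Claim_equal_format_dictionary_to_JSON_string := by
  intro s F I _
  exact fdj_entry _ _ F
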